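-- pv_equiv track=rewrite | github.com/Krejnerw/MIW | kolorowanie.py | mass_point
-- ===== SOURCE A (Python) =====
-- def mass_point(data):
--     mass = {}
--     for key in data.keys():
--         for record in data[key]:
--             if key not in mass:
--                 mass[key] = record
--             else:
--                 if mass[key][1]>record[1]:
--                     mass[key] = record
--     return mass
-- ===== SOURCE B (Python) =====
-- def mass_point(data):
--     pairs = [(key, record) for key, records in data.items() for record in records]
--     pairs.sort(key=lambda p: p[1][1])
--     best = {}
--     for key, record in pairs:
--         if key not in best:
--             best[key] = record
--     return {key: best[key] for key in data if key in best}
-- ===== Notes on version B (the rewrite author's own statement) =====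
-- stated objective: alternative
-- what changed: Instead of A's single nested pass keeping a running best per key, B flattens all (key, record) pairs into one list, stably sorts it globally by the record's second field, scans it once keeping only the first occurrence of each key, and finally rebuilds the result in the original key order; Pre_ requires distinct keys in the association-list encoding, since duplicate-key lists do not represent any Python dict.
import Mathlib
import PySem

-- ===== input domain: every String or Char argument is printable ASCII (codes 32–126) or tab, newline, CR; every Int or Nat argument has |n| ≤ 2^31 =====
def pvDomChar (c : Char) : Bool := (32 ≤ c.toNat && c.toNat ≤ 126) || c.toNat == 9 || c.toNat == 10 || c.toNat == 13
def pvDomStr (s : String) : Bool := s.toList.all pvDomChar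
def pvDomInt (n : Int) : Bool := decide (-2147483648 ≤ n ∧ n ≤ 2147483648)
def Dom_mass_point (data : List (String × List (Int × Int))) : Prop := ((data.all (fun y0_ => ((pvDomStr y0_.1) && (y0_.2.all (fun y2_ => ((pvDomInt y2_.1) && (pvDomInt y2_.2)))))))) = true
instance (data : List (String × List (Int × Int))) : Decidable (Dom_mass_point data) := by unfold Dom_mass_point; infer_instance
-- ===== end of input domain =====

-- B replaces A's nested running-best pass by a different algorithm: flatten all (key, record) pairs,
-- stably sort them globally by the record's second field, keep the first occurrence of each key in one
-- scan, and rebuild in the original key order (alternative; O(N log N) vs A's O(N)). Pre_ restricts to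
-- association lists with distinct keys: only those represent a Python dict (dict keys are unique).


-- ===== PORT A =====
-- mass = {}; for key in data.keys(): for record in data[key]: … ; return mass
-- (the dict 'data' is the association list; data[key] is the dict lookup, total here since key ∈ data.keys())
def mass_point (data : List (String × List (Int × Int))) : List (String × Int × Int) :=
  ((data.map Prod.fst).foldl
    (fun mass key =>
      ((PySem.Dict.ofList data).getD key []).foldl
        (fun mass record =>
          match mass.get? key with
          | none => mass.insert key record              -- key not in mass
          | some cur =>                                  -- else: compare second fields
            if cur.2 > record.2 then mass.insert key record else mass)
        mass)
    (PySem.Dict.empty : PySem.Dict String (Int × Int))).items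

-- ===== PORT B =====
-- pairs = [(key, record) …]; pairs.sort(key=lambda p: p[1][1]); best = {first occurrence per key};
-- return {key: best[key] for key in data if key in best}
def mass_point_alt (data : List (String × List (Int × Int))) : List (String × Int × Int) :=
  let pairs := data.flatMap (fun kv => kv.2.map (fun r => (kv.1, r)))
  let sortedPairs := PySem.List.sorted pairs (fun p => p.2.2)
  let best := sortedPairs.foldl
    (fun (b : PySem.Dict String (Int × Int)) p => if b.contains p.1 then b else b.insert p.1 p.2)
    PySem.Dict.empty
  data.filterMap (fun kv => (best.get? kv.1).map (fun r => (kv.1, r)))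

-- ===== PRECONDITION & SPEC =====
-- Pre_ excludes association lists with duplicate keys: they do not represent any Python dict (dict keys
-- are unique), so no input of the Python programs corresponds to them.
def Pre_mass_point (data : List (String × List (Int × Int))) : Prop :=
  (data.map Prod.fst).Nodup
instance (data : List (String × List (Int × Int))) : Decidable (Pre_mass_point data) := by
  unfold Pre_mass_point; infer_instance

def pvWitness_mass_point : (List (String × List (Int × Int))) :=
  [("a", [(1, 5), (2, 3), (3, 3)]), ("b", []), ("c", [(0, 0)])]

def Spec_mass_point (data : List (String × List (Int × Int))) (out : List (String × Int × Int)) : Prop := out = mass_point_alt data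
instance (data : List (String × List (Int × Int))) (out : List (String × Int × Int)) : Decidable (Spec_mass_point data out) := by unfold Spec_mass_point; infer_instance

-- ===== CLAIM (what is proved, stated in full; the proofs are below) =====
def Claim_equal_mass_point : Prop := ∀ (data : List (String × List (Int × Int))), Dom_mass_point data → Pre_mass_point data → Spec_mass_point data (mass_point data)

-- ===== LEMMAS AND PROOFS =====

-- first record with minimal second field (canonical description both ports are reduced to)
def pvMinBySnd (h : Int × Int) (t : List (Int × Int)) : Int × Int :=
  t.foldl (fun best r => if r.2 < best.2 then r else best) h

-- canonical form: one entry per key with a nonempty record list, its first minimum-by-second-field record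
def pvCanon (data : List (String × List (Int × Int))) : List (String × Int × Int) :=
  data.filterMap (fun kv =>
    match kv.2 with
    | [] => none
    | h :: t => some (kv.1, pvMinBySnd h t))

-- ---------- A = pvCanon ----------

-- the inner step of A's loop, with the current key fixed
def pvStep (key : String) (mass : PySem.Dict String (Int × Int)) (record : Int × Int) :
    PySem.Dict String (Int × Int) :=
  match mass.get? key with
  | none => mass.insert key record
  | some cur => if cur.2 > record.2 then mass.insert key record else mass

-- once key is present, A's inner loop maintains 'mass.insert key best', best = running first-minimum
lemma pvInner (t : List (Int × Int)) (mass : PySem.Dict String (Int × Int)) (key : String)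
    (best : Int × Int) :
    t.foldl (pvStep key) (mass.insert key best) = mass.insert key (pvMinBySnd best t) := by
  induction t generalizing best with
  | nil => simp [pvMinBySnd]
  | cons r t ih =>
    have hstep : pvStep key (mass.insert key best) r
        = mass.insert key (if r.2 < best.2 then r else best) := by
      simp only [pvStep, PySem.Dict.get?_insert_self]
      by_cases h : r.2 < best.2
      · simp [h, PySem.Dict.insert_insert_self]
      · simp [h]
    rw [List.foldl_cons, hstep, ih, show pvMinBySnd best (r :: t)
      = pvMinBySnd (if r.2 < best.2 then r else best) t from rfl]

-- processing one absent key appends exactly the canonical entry for it (nothing, if it has no records)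
lemma pvOneKey (v : List (Int × Int)) (mass : PySem.Dict String (Int × Int)) (key : String)
    (habs : mass.contains key = false) :
    (v.foldl (pvStep key) mass).items
      = mass.items ++ (match v with | [] => [] | h :: t => [(key, pvMinBySnd h t)]) ∧
    (∀ k', k' ≠ key → (v.foldl (pvStep key) mass).contains k' = mass.contains k') ∧
    (mass.keys.Nodup → (v.foldl (pvStep key) mass).keys.Nodup) := by
  cases v with
  | nil => exact ⟨by simp, fun _ _ => rfl, fun h => h⟩
  | cons h t =>
    have hget : mass.get? key = none := (PySem.Dict.get?_eq_none_iff_contains mass key).mpr habs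
    have hfold : (h :: t).foldl (pvStep key) mass = mass.insert key (pvMinBySnd h t) := by
      rw [List.foldl_cons, show pvStep key mass h = mass.insert key h by simp [pvStep, hget],
        pvInner]
    refine ⟨?_, ?_, ?_⟩
    · rw [hfold, PySem.Dict.items_insert_of_not_contains _ _ habs]
    · intro k' hk'
      rw [hfold, PySem.Dict.contains_insert]
      simp [hk']
    · intro hnd; rw [hfold]; exact PySem.Dict.nodup_keys_insert _ _ _ hnd

-- A's outer loop over fresh distinct keys appends the canonical entries in order
lemma pvOuter (l : List (String × List (Int × Int))) (mass : PySem.Dict String (Int × Int))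
    (hfresh : ∀ p ∈ l, mass.contains p.1 = false)
    (hnodup : (l.map Prod.fst).Nodup) (hmk : mass.keys.Nodup) :
    (l.foldl (fun m p => p.2.foldl (pvStep p.1) m) mass).items
      = mass.items ++ pvCanon l := by
  induction l generalizing mass with
  | nil => simp [pvCanon]
  | cons p rest ih =>
    obtain ⟨hitems, hcont, hnd⟩ :=
      pvOneKey p.2 mass p.1 (hfresh p (List.mem_cons_self ..))
    simp only [List.map_cons, List.nodup_cons] at hnodup
    have hfresh' : ∀ q ∈ rest, (p.2.foldl (pvStep p.1) mass).contains q.1 = false := by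
      intro q hq
      have hne : q.1 ≠ p.1 := fun h =>
        hnodup.1 (h ▸ List.mem_map_of_mem hq)
      rw [hcont q.1 hne]
      exact hfresh q (List.mem_cons_of_mem _ hq)
    rw [List.foldl_cons, ih _ hfresh' hnodup.2 (hnd hmk), hitems]
    cases hv : p.2 with
    | nil => simp [pvCanon, hv]
    | cons h t => simp [pvCanon, hv]

-- under distinct keys the dict built from data returns each pair's own records
lemma pvLookup (data : List (String × List (Int × Int)))
    (hnd : (data.map Prod.fst).Nodup) (p : String × List (Int × Int)) (hp : p ∈ data) :
    (PySem.Dict.ofList data).getD p.1 [] = p.2 := by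
  have hitems : (PySem.Dict.ofList data).items
      = data.map (fun q => (q.1, q.2)) := by
    have := PySem.Dict.items_foldl_insert_fresh data Prod.fst Prod.snd PySem.Dict.empty
      (fun a _ => PySem.Dict.contains_empty _) hnd
    simpa [PySem.Dict.ofList, PySem.Dict.update] using this
  have hmem : (p.1, p.2) ∈ (PySem.Dict.ofList data).items := by
    rw [hitems]; exact List.mem_map_of_mem hp
  have hkeys : (PySem.Dict.ofList data).keys.Nodup := PySem.Dict.nodup_keys_ofList data
  exact PySem.Dict.getD_of_mem_items _ hmem hkeys []

lemma pvA_eq_canon (data : List (String × List (Int × Int)))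
    (hpre : (data.map Prod.fst).Nodup) : mass_point data = pvCanon data := by
  unfold mass_point
  rw [List.foldl_map]
  rw [PySem.List.foldl_congr_mem data _
    (fun m p => p.2.foldl (pvStep p.1) m) _
    (fun m p hp => by rw [pvLookup data hpre p hp]; rfl)]
  rw [pvOuter data PySem.Dict.empty (fun p _ => PySem.Dict.contains_empty _) hpre
    (PySem.Dict.nodup_keys_empty ..)]
  rfl

-- ---------- B = pvCanon ----------

-- abbreviations for B's sort
def pvBefore (a b : String × Int × Int) : Bool := decide (a.2.2 < b.2.2)
def pvIns (acc : List (String × Int × Int)) (x : String × Int × Int) :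
    List (String × Int × Int) := PySem.List.insertBy pvBefore x acc

-- filtering commutes with one stable insertion into an already key-sorted accumulator
lemma pvFilterInsertBy (p : String × Int × Int → Bool) (x : String × Int × Int)
    (acc : List (String × Int × Int))
    (hs : acc.Pairwise (fun a b => a.2.2 ≤ b.2.2)) :
    (pvIns acc x).filter p
      = if p x then pvIns (acc.filter p) x else acc.filter p := by
  induction acc with
  | nil =>
    by_cases hx : p x <;> simp [pvIns, PySem.List.insertBy, List.filter, hx]
  | cons y t ih =>
    rcases List.pairwise_cons.mp hs with ⟨hy, ht⟩
    by_cases hb : pvBefore x y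
    · -- x goes in front of y
      have hxy : x.2.2 < y.2.2 := by simpa [pvBefore] using hb
      have hfront : pvIns ((y :: t).filter p) x = x :: (y :: t).filter p := by
        cases hf : (y :: t).filter p with
        | nil => simp [pvIns, PySem.List.insertBy]
        | cons z rest =>
          have hz : z ∈ y :: t := List.mem_of_mem_filter (hf ▸ List.mem_cons_self ..)
          have hxz : x.2.2 < z.2.2 := by
            rcases List.mem_cons.mp hz with h | h
            · exact h ▸ hxy
            · exact lt_of_lt_of_le hxy (hy z h)
          simp [pvIns, PySem.List.insertBy, pvBefore, hxz]
      have h1 : pvIns (y :: t) x = x :: y :: t := by simp [pvIns, PySem.List.insertBy, hb]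
      by_cases hx : p x
      · rw [h1]
        have h2 : List.filter p (x :: y :: t) = x :: List.filter p (y :: t) := by
          rw [List.filter_cons, if_pos hx]
        rw [h2, if_pos hx, hfront]
      · rw [h1]
        have h2 : List.filter p (x :: y :: t) = List.filter p (y :: t) := by
          rw [List.filter_cons, if_neg hx]
        rw [h2, if_neg hx]
    · -- x goes after y
      have h1 : pvIns (y :: t) x = y :: pvIns t x := by
        simp [pvIns, PySem.List.insertBy, hb]
      have ihh := ih ht
      by_cases hyp : p y
      · have h2 : (y :: t).filter p = y :: t.filter p := by simp [hyp]
        by_cases hx : p x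
        · rw [h1, List.filter_cons, if_pos hyp, ihh, if_pos hx, if_pos hx, h2,
            show pvIns (y :: t.filter p) x = y :: pvIns (t.filter p) x by
              simp [pvIns, PySem.List.insertBy, hb]]
        · simp [h1, hyp, ihh, hx, h2]
      · have h2 : (y :: t).filter p = t.filter p := by simp [hyp]
        by_cases hx : p x
        · simp [h1, hyp, ihh, hx, h2]
        · simp [h1, hyp, ihh, hx, h2]

-- filtering commutes with the whole stable sort
lemma pvFilterSorted (p : String × Int × Int → Bool) (xs : List (String × Int × Int)) :
    (PySem.List.sorted xs (fun q => q.2.2)).filter p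
      = PySem.List.sorted (xs.filter p) (fun q => q.2.2) := by
  induction xs using List.reverseRecOn with
  | nil => simp [PySem.List.sorted_eq_foldl_insertBy]
  | append_singleton xs x ih =>
    have hfold : ∀ (l : List (String × Int × Int)),
        PySem.List.sorted l (fun q => q.2.2) = l.foldl pvIns [] := fun l =>
      PySem.List.sorted_eq_foldl_insertBy l (fun q => q.2.2)
    have hs : (PySem.List.sorted xs (fun q => q.2.2)).Pairwise
        (fun a b => a.2.2 ≤ b.2.2) := PySem.List.sorted_pairwise xs (fun q => q.2.2)
    rw [hfold, List.foldl_append, ← hfold, List.foldl_cons, List.foldl_nil]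
    rw [pvFilterInsertBy p x _ hs, List.filter_append]
    by_cases hx : p x
    · simp only [if_true, List.filter_cons, hx, List.filter_nil]
      rw [hfold ((xs.filter p) ++ [x]), List.foldl_append, ← hfold, ih,
        List.foldl_cons, List.foldl_nil]
    · simp [hx, ih]

-- head of the stable sort is the running first minimum
lemma pvHeadFoldl (t : List (String × Int × Int)) (b : String × Int × Int)
    (rest : List (String × Int × Int)) :
    (t.foldl pvIns (b :: rest)).head?
      = some (t.foldl (fun c r => if r.2.2 < c.2.2 then r else c) b) := by
  induction t generalizing b rest with
  | nil => simp
  | cons x t ih =>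
    by_cases hb : pvBefore x b
    · have hx : x.2.2 < b.2.2 := by simpa [pvBefore] using hb
      simp only [List.foldl_cons]
      rw [show pvIns (b :: rest) x = x :: b :: rest by simp [pvIns, PySem.List.insertBy, hb],
        ih, if_pos hx]
    · have hx : ¬ x.2.2 < b.2.2 := by simpa [pvBefore] using hb
      simp only [List.foldl_cons]
      rw [show pvIns (b :: rest) x = b :: pvIns rest x by simp [pvIns, PySem.List.insertBy, hb],
        ih, if_neg hx]

lemma pvHeadSorted (h : String × Int × Int) (t : List (String × Int × Int)) :
    (PySem.List.sorted (h :: t) (fun q => q.2.2)).head?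
      = some (t.foldl (fun c r => if r.2.2 < c.2.2 then r else c) h) := by
  rw [PySem.List.sorted_eq_foldl_insertBy, List.foldl_cons]
  exact pvHeadFoldl t h []

-- the first-occurrence dict built by B's scan answers with the first matching pair
lemma pvBestGet (l : List (String × Int × Int)) (d : PySem.Dict String (Int × Int)) (k : String) :
    (l.foldl (fun b p => if b.contains p.1 then b else b.insert p.1 p.2) d).get? k
      = match d.get? k with
        | some v => some v
        | none => (l.find? (fun p => p.1 == k)).map (fun p => p.2) := by
  induction l generalizing d with
  | nil => cases hd : d.get? k <;> simp [hd]
  | cons p l ih =>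
    simp only [List.foldl_cons]
    by_cases hc : d.contains p.1
    · rw [if_pos hc, ih]
      cases hd : d.get? k with
      | some v => rfl
      | none =>
        have hne : (p.1 == k) = false := by
          rw [beq_eq_false_iff_ne]
          intro h
          have hk : d.contains k = false := (PySem.Dict.get?_eq_none_iff_contains d k).mp hd
          rw [h, hk] at hc
          exact absurd hc (by decide)
        simp [List.find?, hne]
    · rw [if_neg (by simpa using hc), ih]
      by_cases hk : k = p.1
      · have hd : d.get? k = none := by
          rw [hk]
          exact (PySem.Dict.get?_eq_none_iff_contains d p.1).mpr (by simpa using hc)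
        simp only [PySem.Dict.get?_insert, hk, List.find?]
        rw [show d.get? p.1 = none from hk ▸ hd]
        simp
      · rw [PySem.Dict.get?_insert, if_neg hk]
        cases hd : d.get? k with
        | some v => rfl
        | none => simp [List.find?, show (p.1 == k) = false by simpa using Ne.symm hk]

-- find? is the head of filter
lemma pvFindHeadFilter (p : String × Int × Int → Bool) (l : List (String × Int × Int)) :
    l.find? p = (l.filter p).head? := by
  induction l with
  | nil => rfl
  | cons x t ih =>
    by_cases hx : p x
    · rw [List.find?_cons_of_pos hx, List.filter_cons, if_pos hx]
      rfl
    · rw [List.find?_cons_of_neg (by simpa using hx), List.filter_cons, if_neg hx, ih]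

-- the flattened pair list, filtered to one key of a distinct-key list, is that key's own group
lemma pvFilterFlatMapNotMem (l : List (String × List (Int × Int))) (k : String)
    (hk : k ∉ l.map Prod.fst) :
    (l.flatMap (fun kv => kv.2.map (fun r => (kv.1, r)))).filter (fun p => p.1 == k) = [] := by
  rw [List.filter_eq_nil_iff]
  intro q hq
  rcases List.mem_flatMap.mp hq with ⟨kv, hkv, hq'⟩
  rcases List.mem_map.mp hq' with ⟨r, _, rfl⟩
  have : kv.1 ≠ k := fun h => hk (h ▸ List.mem_map_of_mem hkv)
  simpa using this

lemma pvFilterFlatMap (l : List (String × List (Int × Int))) (kv : String × List (Int × Int))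
    (hnd : (l.map Prod.fst).Nodup) (hkv : kv ∈ l) :
    (l.flatMap (fun q => q.2.map (fun r => (q.1, r)))).filter (fun p => p.1 == kv.1)
      = kv.2.map (fun r => (kv.1, r)) := by
  induction l with
  | nil => cases hkv
  | cons q l ih =>
    simp only [List.map_cons, List.nodup_cons] at hnd
    rcases List.mem_cons.mp hkv with rfl | hmem
    · rw [List.flatMap_cons, List.filter_append,
        pvFilterFlatMapNotMem l kv.1 hnd.1, List.append_nil]
      rw [List.filter_eq_self.mpr]
      intro p hp
      rcases List.mem_map.mp hp with ⟨r, _, rfl⟩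
      simp
    · have hne : q.1 ≠ kv.1 := fun h =>
        hnd.1 (h ▸ List.mem_map_of_mem hmem)
      rw [List.flatMap_cons, List.filter_append, ih hnd.2 hmem]
      rw [show (q.2.map (fun r => (q.1, r))).filter (fun p => p.1 == kv.1) = [] by
        rw [List.filter_eq_nil_iff]; intro p hp
        rcases List.mem_map.mp hp with ⟨r, _, rfl⟩
        simpa using hne, List.nil_append]

-- the running first minimum over a constant-key pair list carries the key along
lemma pvFoldMinMap (k : String) (t : List (Int × Int)) (h : Int × Int) :
    (t.map (fun r => (k, r))).foldl (fun c r => if r.2.2 < c.2.2 then r else c) (k, h)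
      = (k, pvMinBySnd h t) := by
  induction t generalizing h with
  | nil => simp [pvMinBySnd]
  | cons r t ih =>
    simp only [List.map_cons, List.foldl_cons]
    by_cases hr : r.2 < h.2
    · rw [if_pos (by simpa using hr), ih, show pvMinBySnd h (r :: t)
        = pvMinBySnd r t by simp [pvMinBySnd, hr]]
    · rw [if_neg (by simpa using hr), ih, show pvMinBySnd h (r :: t)
        = pvMinBySnd h t by simp [pvMinBySnd, hr]]

lemma pvB_eq_canon (data : List (String × List (Int × Int)))
    (hpre : (data.map Prod.fst).Nodup) : mass_point_alt data = pvCanon data := by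
  unfold mass_point_alt pvCanon
  apply List.filterMap_congr
  intro kv hkv
  rw [pvBestGet _ PySem.Dict.empty kv.1]
  rw [show (PySem.Dict.empty : PySem.Dict String (Int × Int)).get? kv.1 = none from
    (PySem.Dict.get?_eq_none_iff_contains _ _).mpr (PySem.Dict.contains_empty _)]
  rw [pvFindHeadFilter, pvFilterSorted, pvFilterFlatMap data kv hpre hkv]
  cases hv : kv.2 with
  | nil =>
    simp [show (PySem.List.sorted ([] : List (String × Int × Int)) fun q => q.2.2) = [] from rfl]
  | cons h t =>
    rw [List.map_cons, pvHeadSorted, pvFoldMinMap]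
    rfl

-- ===== VERDICT (by name: the statement is the Claim_ definition above) =====
theorem mass_point_spec : Claim_equal_mass_point := by
  intro data _hdom hpre
  unfold Spec_mass_point
  rw [pvA_eq_canon data hpre, pvB_eq_canon data hpre]
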